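-- pv_equiv track=rewrite | github.com/DreamTecHunter/SPL-WISCHOUNIG | cryptographie/masterFuncs.py | key_to_order
-- ===== SOURCE A (Python) =====
-- import copy
--
-- def key_to_order(key_word):
--     byte_key_list = [ord(element) for element in list(key_word)]
--     key_list = [-1] * len(byte_key_list)
--     temp_byte_key_list = copy.deepcopy(byte_key_list)
--     temp_byte = max(byte_key_list)
--     for j in range(len(byte_key_list)):
--         temp_position = byte_key_list.index(max(temp_byte_key_list))
--         temp_byte = max([value for value in byte_key_list if value is not None])
--         for i in range(len(byte_key_list) - 1, -1, -1):
--             if byte_key_list[i] is not None: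
--                 if byte_key_list[i] <= temp_byte:
--                     temp_byte = byte_key_list[i]
--                     temp_position = i
--         key_list[temp_position] = max(key_list) + 1
--         byte_key_list[temp_position] = None
--         temp_byte_key_list[temp_position] = -1
--     return key_list
-- ===== SOURCE B (Python) =====
-- def key_to_order(key_word):
--     byts = [ord(c) for c in key_word]
--     n = len(byts)
--     return [sum(1 for j in range(n)
--                 if byts[j] < byts[i] or (byts[j] == byts[i] and j < i))
--             for i in range(n)]
-- ===== Notes on version B (the rewrite author's own statement) =====
-- stated objective: simpler
-- what changed: A repeatedly extracts the minimum from a mutable working copy (sentinel None/-1 marking, an inner backward scan and max() calls per round); B computes each position's rank independently in one comprehension by counting strictly smaller bytes plus equal bytes at earlier indices, with no mutation or selection loop.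
import Mathlib
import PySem

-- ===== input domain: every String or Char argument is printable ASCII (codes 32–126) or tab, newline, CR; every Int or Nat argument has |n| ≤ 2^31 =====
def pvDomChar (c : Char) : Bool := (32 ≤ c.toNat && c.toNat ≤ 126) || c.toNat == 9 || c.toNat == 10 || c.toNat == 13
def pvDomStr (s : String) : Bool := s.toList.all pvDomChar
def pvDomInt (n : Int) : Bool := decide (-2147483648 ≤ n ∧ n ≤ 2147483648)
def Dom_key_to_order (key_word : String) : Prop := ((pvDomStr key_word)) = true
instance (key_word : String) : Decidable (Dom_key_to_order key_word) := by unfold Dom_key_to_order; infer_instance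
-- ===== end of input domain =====

-- B replaces A's destructive selection loop (repeatedly extract the minimum, marking cells None)
-- by an independent per-position rank count; objective: simpler (no mutation, no sentinels).

-- ===== PORT A =====
-- loop body of A's outer `for j in range(len(byte_key_list))` (state: byte_key_list, key_list, temp_byte_key_list)
def pvStepA (st : List (Option Int) × List Int × List Int) :
    List (Option Int) × List Int × List Int :=
  let bkl := st.1
  let kl := st.2.1
  let tbkl := st.2.2
  let n := bkl.length
  -- temp_position = byte_key_list.index(max(temp_byte_key_list))
  let tempPosition0 : Int :=
    match PySem.List.max? tbkl (fun v => v) with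
    | none => 0  -- max([]) : ValueError, unreachable under Pre_
    | some m =>
      match PySem.List.index? bkl (some m) with
      | none => 0  -- .index ValueError, unreachable under Pre_
      | some k => (k : Int)
  -- temp_byte = max([value for value in byte_key_list if value is not None])
  let tempByte0 : Int :=
    match PySem.List.max? (bkl.filterMap id) (fun v => v) with
    | none => 0  -- max([]) : ValueError, unreachable under Pre_
    | some m => m
  -- for i in range(len(byte_key_list) - 1, -1, -1): backward min scan
  let tp := (PySem.List.pyRange ((n : Int) - 1) (-1) (-1)).foldl
    (fun (tp : Int × Int) i =>
      match PySem.List.pyGetD bkl i none with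
      | none => tp
      | some v => if v ≤ tp.1 then (v, i) else tp)
    (tempByte0, tempPosition0)
  -- key_list[temp_position] = max(key_list) + 1; byte_key_list[temp_position] = None; temp_byte_key_list[temp_position] = -1
  let mkl : Int :=
    match PySem.List.max? kl (fun v => v) with
    | none => 0  -- unreachable under Pre_
    | some m => m
  (PySem.List.pySetD bkl tp.2 none,
   PySem.List.pySetD kl tp.2 (mkl + 1),
   PySem.List.pySetD tbkl tp.2 (-1))

def key_to_order (key_word : String) : List Int :=
  let byteKeyList0 : List (Option Int) :=
    (key_word.toList.map (fun c => ((c.toNat : Int)))).map some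
  let n : Nat := byteKeyList0.length
  let keyList0 : List Int := List.replicate n (-1)
  let tempByteKeyList0 : List Int := key_word.toList.map (fun c => ((c.toNat : Int)))
  -- temp_byte = max(byte_key_list): ValueError on the empty key (excluded by Pre_)
  match PySem.List.max? tempByteKeyList0 (fun v => v) with
  | none => []
  | some _ =>
    let final := (PySem.List.pyRange 0 (n : Int) 1).foldl
      (fun (st : List (Option Int) × List Int × List Int) _j => pvStepA st)
      (byteKeyList0, keyList0, tempByteKeyList0)
    final.2.1

-- ===== PORT B =====
def key_to_order_alt (key_word : String) : List Int :=
  let byts : List Int := key_word.toList.map (fun c => ((c.toNat : Int)))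
  let n : Nat := byts.length
  (PySem.List.pyRange 0 (n : Int) 1).map (fun i =>
    ((PySem.List.pyRange 0 (n : Int) 1).map (fun j =>
      if PySem.List.pyGetD byts j 0 < PySem.List.pyGetD byts i 0 ∨
         (PySem.List.pyGetD byts j 0 = PySem.List.pyGetD byts i 0 ∧ j < i)
      then (1 : Int) else 0)).sum)

-- ===== PRECONDITION & SPEC =====
-- Pre_ excludes only the empty string, on which A raises ValueError (max() of an empty sequence).
def Pre_key_to_order (key_word : String) : Prop := key_word ≠ ""
instance (key_word : String) : Decidable (Pre_key_to_order key_word) := by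
  unfold Pre_key_to_order; infer_instance
def pvWitness_key_to_order : String := "banana"

def Spec_key_to_order (key_word : String) (out : List Int) : Prop := out = key_to_order_alt key_word
instance (key_word : String) (out : List Int) : Decidable (Spec_key_to_order key_word out) := by
  unfold Spec_key_to_order; infer_instance

-- ===== CLAIM (what is proved, stated in full; the proofs are below) =====
def Claim_equal_key_to_order : Prop := ∀ (key_word : String), Dom_key_to_order key_word → Pre_key_to_order key_word → Spec_key_to_order key_word (key_to_order key_word)

-- ===== LEMMAS AND PROOFS =====

-- lexicographic "strictly before" on positions of b: smaller byte, ties by smaller index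
def pvLtB (b : List Int) (j i : Nat) : Bool :=
  b.getD j 0 < b.getD i 0 || (b.getD j 0 == b.getD i 0 && decide (j < i))

-- rank of position i: number of positions strictly before it
def pvR (b : List Int) (i : Nat) : Nat :=
  ((Finset.range b.length).filter (fun j => pvLtB b j i = true)).card

lemma pvLtB_iff (b : List Int) (j i : Nat) :
    pvLtB b j i = true ↔ (b.getD j 0 < b.getD i 0 ∨ (b.getD j 0 = b.getD i 0 ∧ j < i)) := by
  simp [pvLtB]

lemma pvLtB_irrefl (b : List Int) (i : Nat) : pvLtB b i i = false := by
  simp [pvLtB]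

lemma pvLtB_total (b : List Int) (j i : Nat) (h : j ≠ i) :
    pvLtB b j i = true ∨ pvLtB b i j = true := by
  simp only [pvLtB_iff]
  rcases Nat.lt_or_ge j i with h1 | h1 <;> rcases lt_trichotomy (b.getD j 0) (b.getD i 0) with h2 | h2 | h2 <;> omega

lemma pvLtB_trans (b : List Int) (k j i : Nat)
    (h1 : pvLtB b k j = true) (h2 : pvLtB b j i = true) : pvLtB b k i = true := by
  simp only [pvLtB_iff] at *
  omega

lemma pvR_mono (b : List Int) (j i : Nat) (hj : j < b.length) (h : pvLtB b j i = true) :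
    pvR b j < pvR b i := by
  apply Finset.card_lt_card
  constructor
  · intro k hk
    simp only [Finset.mem_filter, Finset.mem_range] at *
    exact ⟨hk.1, pvLtB_trans b k j i hk.2 h⟩
  · intro hsub
    have hji : j ∈ (Finset.range b.length).filter (fun k => pvLtB b k i = true) := by
      simp [hj, h]
    have := hsub hji
    simp only [Finset.mem_filter] at this
    simp [pvLtB_irrefl] at this

lemma pvR_lt (b : List Int) (i : Nat) (hi : i < b.length) : pvR b i < b.length := by
  have : pvR b i < (Finset.range b.length).card := by
    apply Finset.card_lt_card
    constructor
    · exact Finset.filter_subset _ _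
    · intro hsub
      have := hsub (Finset.mem_range.mpr hi)
      simp only [Finset.mem_filter] at this
      simp [pvLtB_irrefl] at this
  simpa using this

lemma pvR_inj (b : List Int) (i j : Nat) (hi : i < b.length) (hj : j < b.length)
    (h : pvR b i = pvR b j) : i = j := by
  by_contra hne
  rcases pvLtB_total b i j hne with hl | hl
  · exact absurd h (Nat.ne_of_lt (pvR_mono b i j hi hl))
  · exact absurd h.symm (Nat.ne_of_lt (pvR_mono b j i hj hl))

lemma pvR_rev (b : List Int) (j i : Nat) (_hj : j < b.length) (hi : i < b.length)
    (h : pvR b j < pvR b i) : pvLtB b j i = true := by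
  rcases eq_or_ne j i with rfl | hne
  · omega
  rcases pvLtB_total b j i hne with hl | hl
  · exact hl
  · exact absurd h (by have := pvR_mono b i j hi hl; omega)

lemma pvR_surj (b : List Int) (t : Nat) (ht : t < b.length) :
    ∃ p, p < b.length ∧ pvR b p = t := by
  have hinj : Function.Injective (fun i : Fin b.length => (⟨pvR b i, pvR_lt b i i.2⟩ : Fin b.length)) := by
    intro x y hxy
    simp only [Fin.mk.injEq] at hxy
    exact Fin.ext (pvR_inj b x y x.2 y.2 hxy)
  have hsurj := Finite.surjective_of_injective hinj ⟨t, ht⟩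
  rcases hsurj with ⟨p, hp⟩
  exact ⟨p, p.2, by simpa using congrArg Fin.val hp⟩

-- the three components of A's state after t rounds
def pvBkl (b : List Int) (t : Nat) : List (Option Int) :=
  (List.range b.length).map (fun i => if pvR b i < t then none else some (b.getD i 0))
def pvKl (b : List Int) (t : Nat) : List Int :=
  (List.range b.length).map (fun i => if pvR b i < t then ((pvR b i : Int)) else -1)
def pvTbkl (b : List Int) (t : Nat) : List Int :=
  (List.range b.length).map (fun i => if pvR b i < t then -1 else b.getD i 0)

lemma pv_self_eq_map_range (l : List Int) :
    l = (List.range l.length).map (fun i => l.getD i 0) := by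
  apply List.ext_getElem
  · simp
  · intro i hi hi2
    simp at hi2 ⊢
    simp [List.getElem?_eq_getElem hi2]

lemma pv_set_map_range {α : Type} (n : Nat) (f : Nat → α) (p : Nat) (v : α) :
    ((List.range n).map f).set p v = (List.range n).map (fun i => if i = p then v else f i) := by
  apply List.ext_getElem
  · simp
  · intro i hi hi2
    rw [List.getElem_set]
    simp at hi2 ⊢
    rcases eq_or_ne i p with rfl | hne
    · simp
    · simp [hne, Ne.symm hne]

-- the backward scan: running minimum with leftmost-tie position, over indices n-1 … n-k
lemma pvScanAux (b : List Int) (t : Nat) (M q0 : Int)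
    (hM : ∀ i, i < b.length → t ≤ pvR b i → b.getD i 0 ≤ M) :
    ∀ k, k ≤ b.length →
    (∀ i, b.length - k ≤ i → i < b.length → t ≤ pvR b i →
      ((List.range k).foldl
        (fun (tp : Int × Int) (κ : Nat) =>
          (PySem.List.pyGetD (pvBkl b t) (((b.length : Int) - 1) - (κ : Int)) none).elim tp
            (fun v => if v ≤ tp.1 then (v, (((b.length : Int) - 1) - (κ : Int))) else tp))
        (M, q0)).1 ≤ b.getD i 0) ∧
    ((∀ i, b.length - k ≤ i → i < b.length → ¬ (t ≤ pvR b i)) →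
      ((List.range k).foldl
        (fun (tp : Int × Int) (κ : Nat) =>
          (PySem.List.pyGetD (pvBkl b t) (((b.length : Int) - 1) - (κ : Int)) none).elim tp
            (fun v => if v ≤ tp.1 then (v, (((b.length : Int) - 1) - (κ : Int))) else tp))
        (M, q0)) = (M, q0)) ∧
    ((∃ i, b.length - k ≤ i ∧ i < b.length ∧ t ≤ pvR b i) →
      ∃ q : Nat,
        ((List.range k).foldl
          (fun (tp : Int × Int) (κ : Nat) =>
            (PySem.List.pyGetD (pvBkl b t) (((b.length : Int) - 1) - (κ : Int)) none).elim tp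
              (fun v => if v ≤ tp.1 then (v, (((b.length : Int) - 1) - (κ : Int))) else tp))
          (M, q0)) = (b.getD q 0, (q : Int)) ∧
        b.length - k ≤ q ∧ q < b.length ∧ t ≤ pvR b q ∧
        (∀ i, b.length - k ≤ i → i < q → t ≤ pvR b i →
          b.getD q 0 < b.getD i 0)) := by
  intro k
  induction k with
  | zero =>
    intro _
    refine ⟨?_, fun _ => rfl, ?_⟩
    · intro i h1 h2 _; omega
    · rintro ⟨i, h1, h2, _⟩; omega
  | succ k ih =>
    intro hk
    obtain ⟨ih1, ih2, ih3⟩ := ih (by omega)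
    have hkn : k < b.length := by omega
    have hcast : ((b.length : Int) - 1) - (k : Int) = ((b.length - 1 - k : Nat) : Int) := by omega
    have hget : PySem.List.pyGetD (pvBkl b t) (((b.length : Int) - 1) - (k : Int)) none
        = (if pvR b (b.length - 1 - k) < t then none else some (b.getD (b.length - 1 - k) 0)) := by
      rw [hcast, PySem.List.pyGetD_natCast]
      simp only [pvBkl]
      exact PySem.List.getD_map_range _ _ _ _ (by omega)
    set i0 := b.length - 1 - k with hi0
    simp only [List.range_succ, List.foldl_append, List.foldl_cons, List.foldl_nil]
    set G := (List.range k).foldl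
        (fun (tp : Int × Int) (κ : Nat) =>
          (PySem.List.pyGetD (pvBkl b t) (((b.length : Int) - 1) - (κ : Int)) none).elim tp
            (fun v => if v ≤ tp.1 then (v, (((b.length : Int) - 1) - (κ : Int))) else tp))
        (M, q0) with hGdef
    rw [hget, hcast]
    by_cases hc : pvR b i0 < t
    · simp only [if_pos hc, Option.elim_none]
      refine ⟨?_, ?_, ?_⟩
      · intro i h1 h2 h3
        rcases eq_or_ne i i0 with rfl | hne
        · omega
        · exact ih1 i (by omega) h2 h3
      · intro hall
        exact ih2 (fun i h1 h2 => hall i (by omega) h2)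
      · rintro ⟨i, h1, h2, h3⟩
        have hne : i ≠ i0 := by intro h; rw [h] at h3; omega
        obtain ⟨q, hq, hq1, hq2, hq3, hqmin⟩ := ih3 ⟨i, by omega, h2, h3⟩
        refine ⟨q, hq, by omega, hq2, hq3, ?_⟩
        intro i' h1' h2' h3'
        rcases eq_or_ne i' i0 with rfl | hne'
        · omega
        · exact hqmin i' (by omega) h2' h3'
    · simp only [if_neg hc, Option.elim_some]
      have hc' : t ≤ pvR b i0 := by omega
      have hi0n : i0 < b.length := by omega
      by_cases hw : ∃ i, b.length - k ≤ i ∧ i < b.length ∧ t ≤ pvR b i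
      · obtain ⟨q, hGq, hq1, hq2, hq3, hqmin⟩ := ih3 hw
        rw [hGq]
        by_cases hle : b.getD i0 0 ≤ b.getD q 0
        · rw [if_pos (by simpa using hle)]
          refine ⟨?_, ?_, ?_⟩
          · intro i h1 h2 h3
            rcases eq_or_ne i i0 with rfl | hne
            · simp
            · have h' := ih1 i (by omega) h2 h3
              rw [hGq] at h'
              show b.getD i0 0 ≤ b.getD i 0
              exact le_trans hle h'
          · intro hall
            exact absurd hc' (hall i0 (by omega) hi0n)
          · intro _
            refine ⟨i0, rfl, by omega, hi0n, hc', ?_⟩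
            intro i h1 h2 _
            omega
        · rw [if_neg (by simpa using hle)]
          refine ⟨?_, ?_, ?_⟩
          · intro i h1 h2 h3
            rcases eq_or_ne i i0 with rfl | hne
            · show b.getD q 0 ≤ b.getD i0 0
              omega
            · have := ih1 i (by omega) h2 h3
              rw [hGq] at this
              exact this
          · intro hall
            exact absurd hc' (hall i0 (by omega) hi0n)
          · intro _
            refine ⟨q, rfl, by omega, hq2, hq3, ?_⟩
            intro i h1 h2 h3
            rcases eq_or_ne i i0 with rfl | hne
            · omega
            · exact hqmin i (by omega) h2 h3
      · have hw' : ∀ i, b.length - k ≤ i → i < b.length → ¬ (t ≤ pvR b i) := by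
          intro i h1 h2 h3
          exact hw ⟨i, h1, h2, h3⟩
        rw [ih2 hw']
        rw [if_pos (by simpa using hM i0 hi0n hc')]
        refine ⟨?_, ?_, ?_⟩
        · intro i h1 h2 h3
          rcases eq_or_ne i i0 with rfl | hne
          · simp
          · exact absurd h3 (hw' i (by omega) h2)
        · intro hall
          exact absurd hc' (hall i0 (by omega) hi0n)
        · intro _
          refine ⟨i0, rfl, by omega, hi0n, hc', ?_⟩
          intro i h1 h2 _
          omega

lemma pvInner (b : List Int) (t p : Nat) (hp : p < b.length) (hrp : pvR b p = t)
    (M q0 : Int)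
    (hM : ∀ i, i < b.length → t ≤ pvR b i → b.getD i 0 ≤ M) :
    (PySem.List.pyRange ((b.length : Int) - 1) (-1) (-1)).foldl
      (fun (tp : Int × Int) i =>
        match PySem.List.pyGetD (pvBkl b t) i none with
        | none => tp
        | some v => if v ≤ tp.1 then (v, i) else tp)
      (M, q0) = (b.getD p 0, (p : Int)) := by
  rw [PySem.List.pyRange_neg_one]
  have hn : ((b.length : Int) - 1 - (-1)).toNat = b.length := by omega
  rw [hn, List.foldl_map]
  have hfun : (fun (tp : Int × Int) (κ : Nat) =>
      match PySem.List.pyGetD (pvBkl b t) (((b.length : Int) - 1) - (κ : Int)) none with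
      | none => tp
      | some v => if v ≤ tp.1 then (v, ((b.length : Int) - 1) - (κ : Int)) else tp)
      = (fun (tp : Int × Int) (κ : Nat) =>
      (PySem.List.pyGetD (pvBkl b t) (((b.length : Int) - 1) - (κ : Int)) none).elim tp
        (fun v => if v ≤ tp.1 then (v, (((b.length : Int) - 1) - (κ : Int))) else tp)) := by
    funext tp κ
    cases PySem.List.pyGetD (pvBkl b t) (((b.length : Int) - 1) - (κ : Int)) none <;> rfl
  rw [hfun]
  obtain ⟨h1, h2, h3⟩ := pvScanAux b t M q0 hM b.length le_rfl
  obtain ⟨q, hq, _, hq2, hq3, hqmin⟩ := h3 ⟨p, by omega, hp, by omega⟩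
  have hqp : q = p := by
    by_contra hne
    have hrq : t < pvR b q := by
      rcases Nat.lt_or_ge t (pvR b q) with h | h
      · exact h
      · have htq : pvR b q = t := by omega
        exact absurd (pvR_inj b q p hq2 hp (by rw [htq, hrp])) hne
    have hlex : pvLtB b p q = true := pvR_rev b p q hp hq2 (by omega)
    rw [pvLtB_iff] at hlex
    have h1p := h1 p (by omega) hp (by omega)
    rw [hq] at h1p
    rcases hlex with h | ⟨heq, hlt⟩
    · exact absurd h1p (by simp; omega)
    · have := hqmin p (by omega) hlt (by omega)
      omega
  rw [hq, hqp]

lemma pv_bkl_succ (b : List Int) (t p : Nat) (hp : p < b.length) (hrp : pvR b p = t) :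
    PySem.List.pySetD (pvBkl b t) (p : Int) none = pvBkl b (t + 1) := by
  rw [PySem.List.pySetD_natCast]
  simp only [pvBkl]
  rw [pv_set_map_range]
  apply List.map_congr_left
  intro i hi
  simp only [List.mem_range] at hi
  rcases eq_or_ne i p with rfl | hne
  · rw [if_pos rfl, if_pos (by omega)]
  · have hne' : pvR b i ≠ t := fun hh => hne (pvR_inj b i p hi hp (by rw [hh, hrp]))
    rw [if_neg hne]
    split_ifs <;> first | rfl | omega

lemma pv_kl_succ (b : List Int) (t p : Nat) (hp : p < b.length) (hrp : pvR b p = t) :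
    PySem.List.pySetD (pvKl b t) (p : Int) ((t : Int)) = pvKl b (t + 1) := by
  rw [PySem.List.pySetD_natCast]
  simp only [pvKl]
  rw [pv_set_map_range]
  apply List.map_congr_left
  intro i hi
  simp only [List.mem_range] at hi
  rcases eq_or_ne i p with rfl | hne
  · rw [if_pos rfl, if_pos (by omega), hrp]
  · have hne' : pvR b i ≠ t := fun hh => hne (pvR_inj b i p hi hp (by rw [hh, hrp]))
    rw [if_neg hne]
    split_ifs <;> first | rfl | omega

lemma pv_tbkl_succ (b : List Int) (t p : Nat) (hp : p < b.length) (hrp : pvR b p = t) :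
    PySem.List.pySetD (pvTbkl b t) (p : Int) (-1) = pvTbkl b (t + 1) := by
  rw [PySem.List.pySetD_natCast]
  simp only [pvTbkl]
  rw [pv_set_map_range]
  apply List.map_congr_left
  intro i hi
  simp only [List.mem_range] at hi
  rcases eq_or_ne i p with rfl | hne
  · rw [if_pos rfl, if_pos (by omega)]
  · have hne' : pvR b i ≠ t := fun hh => hne (pvR_inj b i p hi hp (by rw [hh, hrp]))
    rw [if_neg hne]
    split_ifs <;> first | rfl | omega

lemma pvStep_state (b : List Int) (t : Nat) (ht : t < b.length) :
    pvStepA (pvBkl b t, pvKl b t, pvTbkl b t) = (pvBkl b (t+1), pvKl b (t+1), pvTbkl b (t+1)) := by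
  obtain ⟨p, hp, hrp⟩ := pvR_surj b t ht
  have hlen : (pvBkl b t).length = b.length := by simp [pvBkl]
  have hmemp : b.getD p 0 ∈ (pvBkl b t).filterMap id := by
    simp only [List.mem_filterMap, id]
    refine ⟨some (b.getD p 0), ?_, rfl⟩
    simp only [pvBkl, List.mem_map, List.mem_range]
    exact ⟨p, hp, by rw [if_neg (by omega)]⟩
  rcases hmax : PySem.List.max? ((pvBkl b t).filterMap id) (fun v => v) with _ | M
  · rw [PySem.List.max?_eq_none_iff] at hmax
    rw [hmax] at hmemp
    simp at hmemp
  have hM : ∀ i, i < b.length → t ≤ pvR b i → b.getD i 0 ≤ M := by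
    intro i hi hti
    have hmem : b.getD i 0 ∈ (pvBkl b t).filterMap id := by
      simp only [List.mem_filterMap, id]
      refine ⟨some (b.getD i 0), ?_, rfl⟩
      simp only [pvBkl, List.mem_map, List.mem_range]
      exact ⟨i, hi, by rw [if_neg (by omega)]⟩
    exact PySem.List.max?_isMax hmax _ hmem
  have hklne : pvKl b t ≠ [] := by
    have hl : (pvKl b t).length = b.length := by simp [pvKl]
    intro h
    rw [h] at hl
    simp at hl
    omega
  rcases hmax2 : PySem.List.max? (pvKl b t) (fun v => v) with _ | M2
  · rw [PySem.List.max?_eq_none_iff] at hmax2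
    exact absurd hmax2 hklne
  have hM2 : M2 = (t : Int) - 1 := by
    have hub : M2 ≤ (t : Int) - 1 := by
      have hmem2 := PySem.List.max?_mem hmax2
      simp only [pvKl, List.mem_map, List.mem_range] at hmem2
      obtain ⟨i, hi, hval⟩ := hmem2
      split_ifs at hval <;> omega
    have hlb : ((t : Int) - 1) ∈ pvKl b t := by
      rcases Nat.eq_zero_or_pos t with rfl | htpos
      · simp only [pvKl, List.mem_map, List.mem_range]
        exact ⟨p, hp, by rw [if_neg (by omega)]; norm_num⟩
      · obtain ⟨p', hp', hrp'⟩ := pvR_surj b (t-1) (by omega)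
        simp only [pvKl, List.mem_map, List.mem_range]
        exact ⟨p', hp', by rw [if_pos (by omega), hrp']; omega⟩
    have := PySem.List.max?_isMax hmax2 _ hlb
    omega
  simp only [pvStepA, hlen, hmax, hmax2]
  rw [pvInner b t p hp hrp M _ hM]
  have hval : M2 + 1 = (t : Int) := by omega
  rw [hval, pv_bkl_succ b t p hp hrp, pv_kl_succ b t p hp hrp, pv_tbkl_succ b t p hp hrp]

lemma pvIter (b : List Int) (t : Nat) (ht : t ≤ b.length) :
    pvStepA^[t] (pvBkl b 0, pvKl b 0, pvTbkl b 0) = (pvBkl b t, pvKl b t, pvTbkl b t) := by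
  induction t with
  | zero => rfl
  | succ t ih =>
    rw [Function.iterate_succ_apply', ih (by omega), pvStep_state b t (by omega)]

lemma pv_init_bkl (b : List Int) : b.map some = pvBkl b 0 := by
  conv_lhs => rw [pv_self_eq_map_range b]
  simp [pvBkl, List.map_map, Function.comp]

lemma pv_init_kl (b : List Int) : List.replicate b.length (-1 : Int) = pvKl b 0 := by
  simp only [pvKl, Nat.not_lt_zero, if_false]
  rw [List.map_const']
  simp

lemma pv_init_tbkl (b : List Int) : b = pvTbkl b 0 := by
  conv_lhs => rw [pv_self_eq_map_range b]
  simp [pvTbkl]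

lemma pv_countP (b : List Int) (i : Nat) :
    (List.range b.length).countP (fun j => pvLtB b j i) = pvR b i := by
  rw [pvR]
  simp [Finset.range, Multiset.range, Finset.card, Finset.filter, Multiset.filter,
    List.countP_eq_length_filter]

-- ===== VERDICT (by name: the statement is the Claim_ definition above) =====
theorem key_to_order_spec : Claim_equal_key_to_order := by
  intro kw _ hpre
  unfold Spec_key_to_order
  have hne : kw.toList ≠ [] := fun h => hpre (String.toList_eq_nil_iff.mp h)
  simp only [key_to_order, key_to_order_alt]
  set b := kw.toList.map (fun c => ((c.toNat : Int))) with hb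
  have hbne : b ≠ [] := by
    rw [hb]
    simpa using hne
  rcases hmx : PySem.List.max? b (fun v => v) with _ | m
  · rw [PySem.List.max?_eq_none_iff] at hmx
    exact absurd hmx hbne
  simp only [List.length_map]
  rw [List.foldl_const]
  have hlen : (PySem.List.pyRange 0 (b.length : Int) 1).length = b.length := by
    rw [PySem.List.length_pyRange_one]
    omega
  have hinit : (pvBkl b 0, pvKl b 0, pvTbkl b 0)
      = (b.map some, List.replicate b.length (-1 : Int), b) := by
    rw [← pv_init_bkl, ← pv_init_kl, ← pv_init_tbkl]
  rw [hlen, hinit.symm, pvIter b b.length le_rfl]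
  -- left-hand side is now pvKl b b.length; rewrite B's expression
  rw [PySem.List.pyRange_zero_nat, List.map_map]
  simp only [pvKl]
  apply List.map_congr_left
  intro i hi
  simp only [List.mem_range] at hi
  rw [if_pos (pvR_lt b i hi)]
  simp only [Function.comp_apply]
  rw [List.map_map]
  have hfun : ((fun j => if PySem.List.pyGetD b j 0 < PySem.List.pyGetD b (i : Int) 0 ∨
        (PySem.List.pyGetD b j 0 = PySem.List.pyGetD b (i : Int) 0 ∧ j < (i : Int))
      then (1 : Int) else 0) ∘ (fun k : Nat => (k : Int)))
      = fun j : Nat => if pvLtB b j i then (1 : Int) else 0 := by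
    funext j
    simp only [Function.comp]
    refine if_congr ?_ rfl rfl
    rw [pvLtB_iff]
    simp only [PySem.List.pyGetD_natCast, Nat.cast_lt]
  rw [hfun, PySem.List.sum_map_ite_one_zero, pv_countP]
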